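-- pv_equiv track=rewrite | github.com/sipeed/MaixCDK | tools/cmake/components_depends.py | get_depends
-- ===== SOURCE A (Python) =====
-- def get_depends(component, data):
--     depends = data[component] if component in data else []
--     sub_depends = []
--     for d in depends:
--         if d == component:
--             continue
--         sub_depends += get_depends(d, data)
--     return depends + sub_depends
-- ===== SOURCE B (Python) =====
-- def get_depends(component, data):
--     cache = {}
--
--     def solve(c):
--         cached = cache.get(c)
--         if cached is not None:
--             return cached
--         deps = data.get(c, [])
--         out = list(deps)
--         for d in deps:
--             if d != c:
--                 out += solve(d)
--         cache[c] = out
--         return out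
--
--     return solve(component)
-- ===== Notes on version B (the rewrite author's own statement) =====
-- stated objective: alternative
-- what changed: B replaces A's plain recursion, which re-descends into a shared dependency subtree once per reference, by a single memoized DFS that caches each component's finished dependency list and reuses it; same return value.
import Mathlib
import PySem

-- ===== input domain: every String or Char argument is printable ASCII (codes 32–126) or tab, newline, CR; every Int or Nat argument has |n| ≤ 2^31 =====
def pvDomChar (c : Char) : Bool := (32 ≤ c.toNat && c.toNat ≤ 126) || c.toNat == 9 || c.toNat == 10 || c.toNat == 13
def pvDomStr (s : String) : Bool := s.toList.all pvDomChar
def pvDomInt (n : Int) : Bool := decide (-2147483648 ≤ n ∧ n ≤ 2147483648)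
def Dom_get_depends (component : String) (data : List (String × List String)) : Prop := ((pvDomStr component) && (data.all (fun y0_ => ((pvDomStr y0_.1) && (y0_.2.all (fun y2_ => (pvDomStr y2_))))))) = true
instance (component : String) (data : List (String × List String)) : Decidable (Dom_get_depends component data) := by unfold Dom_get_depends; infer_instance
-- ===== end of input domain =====

-- B replaces A's plain recursion (which re-descends into a shared dependency subtree once
-- per reference) by a single memoized DFS with a per-component cache; same return value.

-- ===== PORT A =====
-- fuel-bounded transliteration of the recursive Python A; on acyclic data (Pre_) the
-- recursion depth is at most data.length, so the fuel is never exhausted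
def getDependsA (data : List (String × List String)) : Nat → String → List String
  | 0, _ => []
  | fuel+1, component =>
    -- depends = data[component] if component in data else []
    let depends := (PySem.Dict.mk data).getD component []
    -- for d in depends: if d == component: continue; sub_depends += get_depends(d, data)
    let sub_depends := depends.foldl
      (fun sub d => if d = component then sub else sub ++ getDependsA data fuel d) []
    depends ++ sub_depends

def get_depends (component : String) (data : List (String × List String)) : List String :=
  getDependsA data (data.length + 1) component

-- ===== PORT B =====
-- memoized DFS (Source B's `solve`): the cache maps a component to its full dependency list
def solveB (data : List (String × List String)) :
    Nat → String → PySem.Dict String (List String) →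
    List String × PySem.Dict String (List String)
  | 0, _, cache => ([], cache)
  | fuel+1, c, cache =>
    match cache.get? c with
    | some v => (v, cache)                  -- cached = cache.get(c); if cached is not None
    | none =>
      let deps := (PySem.Dict.mk data).getD c []   -- deps = data.get(c, [])
      let oc := deps.foldl                          -- out = list(deps); for d in deps: …
        (fun (p : List String × PySem.Dict String (List String)) d =>
          if d ≠ c then
            let r := solveB data fuel d p.2
            (p.1 ++ r.1, r.2)
          else p) (deps, cache)
      (oc.1, oc.2.insert c oc.1)                    -- cache[c] = out; return out

def get_depends_alt (component : String) (data : List (String × List String)) : List String :=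
  (solveB data (data.length + 1) component PySem.Dict.empty).1

-- ===== PRECONDITION & SPEC =====
-- dependency successors of c, with self-dependencies skipped (Python's `continue`)
def pvNexts (data : List (String × List String)) (c : String) : List String :=
  ((PySem.Dict.mk data).getD c []).filter (fun d => d ≠ c)

-- everything reachable from c in at most k dependency steps
def pvReach (data : List (String × List String)) : Nat → String → List String
  | 0, c => [c]
  | k+1, c => c :: (pvNexts data c).flatMap (fun d => pvReach data k d)

-- Pre_ excludes exactly the inputs with a dependency cycle reachable from component,
-- on which the Python A never returns (it dies with RecursionError)
def Pre_get_depends (component : String) (data : List (String × List String)) : Prop :=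
  ∀ u ∈ pvReach data data.length component,
    ∀ d ∈ pvNexts data u, u ∉ pvReach data (data.length - 1) d
instance (component : String) (data : List (String × List String)) : Decidable (Pre_get_depends component data) := by unfold Pre_get_depends; infer_instance

def pvWitness_get_depends : String × (List (String × List String)) :=
  ("a", [("a", ["b", "c"]), ("b", ["c"]), ("c", [])])

def Spec_get_depends (component : String) (data : List (String × List String)) (out : List String) : Prop := out = get_depends_alt component data
instance (component : String) (data : List (String × List String)) (out : List String) : Decidable (Spec_get_depends component data out) := by unfold Spec_get_depends; infer_instance

-- ===== CLAIM (what is proved, stated in full; the proofs are below) =====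
def Claim_equal_get_depends : Prop := ∀ (component : String) (data : List (String × List String)), Dom_get_depends component data → Pre_get_depends component data → Spec_get_depends component data (get_depends component data)

-- ===== LEMMAS AND PROOFS =====

-- ancestor chain: comp → … → seen.head → c along pvNexts edges (seen is nearest-first)
def pvChainFrom (data : List (String × List String)) (comp : String) : List String → String → Prop
  | [], c => c = comp
  | s :: rest, c => c ∈ pvNexts data s ∧ pvChainFrom data comp rest s

lemma pvReach_zero (data : List (String × List String)) (c u : String) :
    u ∈ pvReach data 0 c ↔ u = c := by simp [pvReach]

lemma pvReach_succ (data : List (String × List String)) (k : Nat) (c u : String) :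
    u ∈ pvReach data (k+1) c ↔ u = c ∨ ∃ d ∈ pvNexts data c, u ∈ pvReach data k d := by
  rw [show pvReach data (k+1) c = c :: (pvNexts data c).flatMap (fun d => pvReach data k d) from rfl]
  simp only [List.mem_cons, List.mem_flatMap]

lemma pvReach_self (data : List (String × List String)) (k : Nat) (c : String) :
    c ∈ pvReach data k c := by
  cases k with
  | zero => exact (pvReach_zero data c c).mpr rfl
  | succ k => exact (pvReach_succ data k c c).mpr (Or.inl rfl)

lemma pvReach_mono_succ (data : List (String × List String)) :
    ∀ (k : Nat) (c u : String), u ∈ pvReach data k c → u ∈ pvReach data (k+1) c := by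
  intro k
  induction k with
  | zero =>
    intro c u hu
    rw [pvReach_zero] at hu
    subst hu; exact pvReach_self data 1 u
  | succ k IH =>
    intro c u hu
    rw [pvReach_succ] at hu
    rw [pvReach_succ]
    rcases hu with h | ⟨d, hd, hu⟩
    · exact Or.inl h
    · exact Or.inr ⟨d, hd, IH d u hu⟩

lemma pvReach_mono (data : List (String × List String)) {k m : Nat} (h : k ≤ m)
    {c u : String} (hu : u ∈ pvReach data k c) : u ∈ pvReach data m c := by
  induction m with
  | zero =>
    have : k = 0 := by omega
    exact this ▸ hu
  | succ m IH =>
    rcases Nat.lt_or_ge k (m+1) with h' | h'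
    · exact pvReach_mono_succ data m c u (IH (by omega))
    · have : k = m + 1 := by omega
      exact this ▸ hu

lemma pvReach_snoc (data : List (String × List String)) :
    ∀ (k : Nat) (x s c : String), s ∈ pvReach data k x → c ∈ pvNexts data s →
      c ∈ pvReach data (k+1) x := by
  intro k
  induction k with
  | zero =>
    intro x s c hs hc
    rw [pvReach_zero] at hs
    subst hs
    exact (pvReach_succ data 0 s c).mpr (Or.inr ⟨c, hc, pvReach_self data 0 c⟩)
  | succ k IH =>
    intro x s c hs hc
    rw [pvReach_succ] at hs
    rw [pvReach_succ]
    rcases hs with h | ⟨d, hd, hs⟩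
    · subst h
      exact Or.inr ⟨c, hc, pvReach_self data (k+1) c⟩
    · exact Or.inr ⟨d, hd, IH d s c hs hc⟩

lemma pvChain_reach (data : List (String × List String)) (comp : String) :
    ∀ (seen : List String) (c : String), pvChainFrom data comp seen c →
      c ∈ pvReach data seen.length comp := by
  intro seen
  induction seen with
  | nil =>
    intro c hch
    rw [show pvChainFrom data comp [] c = (c = comp) from rfl] at hch
    subst hch; exact pvReach_self data 0 c
  | cons s rest IH =>
    intro c hch
    obtain ⟨h1, h2⟩ := hch
    exact pvReach_snoc data rest.length comp s c (IH s h2) h1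

lemma pvChain_cycle (data : List (String × List String)) (comp c : String) :
    ∀ (pre suf : List String) (y : String),
      pvChainFrom data comp (pre ++ c :: suf) y →
      ∃ d ∈ pvNexts data c, y ∈ pvReach data pre.length d := by
  intro pre
  induction pre with
  | nil =>
    intro suf y hch
    obtain ⟨h1, _⟩ := hch
    exact ⟨y, h1, pvReach_self data 0 y⟩
  | cons p pre IH =>
    intro suf y hch
    obtain ⟨h1, h2⟩ := hch
    obtain ⟨d, hd, hp⟩ := IH suf p h2
    exact ⟨d, hd, pvReach_snoc data pre.length d p y hp h1⟩

lemma pvKey_of_deps_ne (data : List (String × List String)) (c : String)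
    (h : (PySem.Dict.mk data).getD c [] ≠ []) : c ∈ data.map Prod.fst := by
  induction data with
  | nil => simp [PySem.Dict.getD, PySem.Dict.get?] at h
  | cons p rest IH =>
    rcases p with ⟨k, v⟩
    by_cases hk : k = c
    · subst hk; simp
    · simp only [List.map_cons, List.mem_cons]
      refine Or.inr (IH ?_)
      rw [PySem.Dict.getD_eq_get?_getD, PySem.Dict.get?_mk_cons] at h
      simp only [beq_iff_eq, hk, if_false] at h
      rw [PySem.Dict.getD_eq_get?_getD]
      exact h

lemma pvSeen_le (data : List (String × List String)) (seen : List String)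
    (hnd : seen.Nodup) (hk : ∀ s ∈ seen, s ∈ data.map Prod.fst) :
    seen.length ≤ data.length := by
  have h1 : seen.length = seen.toFinset.card := (List.toFinset_card_of_nodup hnd).symm
  have h2 : seen.toFinset ⊆ (data.map Prod.fst).toFinset := by
    intro x hx
    rw [List.mem_toFinset] at hx ⊢
    exact hk x hx
  calc seen.length = seen.toFinset.card := h1
    _ ≤ (data.map Prod.fst).toFinset.card := Finset.card_le_card h2
    _ ≤ (data.map Prod.fst).length := List.toFinset_card_le _
    _ = data.length := List.length_map _

-- on acyclic data an ancestor chain never revisits its end node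
lemma pvNotMem (data : List (String × List String)) (comp : String)
    (hpre : Pre_get_depends comp data) (seen : List String) (c : String)
    (hnd : seen.Nodup) (hk : ∀ s ∈ seen, s ∈ data.map Prod.fst)
    (hch : pvChainFrom data comp seen c) : c ∉ seen := by
  intro hmem
  obtain ⟨pre, suf, hsplit⟩ := List.append_of_mem hmem
  subst hsplit
  obtain ⟨d, hd, hcy⟩ := pvChain_cycle data comp c pre suf c hch
  have hlen : (pre ++ c :: suf).length ≤ data.length := pvSeen_le data _ hnd hk
  have hpl : pre.length ≤ data.length - 1 := by
    simp only [List.length_append, List.length_cons] at hlen; omega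
  have hcreach : c ∈ pvReach data data.length comp := by
    have := pvChain_reach data comp _ c hch
    exact pvReach_mono data hlen this
  exact hpre c hcreach d hd (pvReach_mono data hpl hcy)

lemma pvFoldA (c : String) (g : String → List String) :
    ∀ (l acc : List String),
      l.foldl (fun sub d => if d = c then sub else sub ++ g d) acc
        = acc ++ (l.filter (fun d => d ≠ c)).flatMap g := by
  intro l
  induction l with
  | nil => intro acc; simp
  | cons d l IH =>
    intro acc
    by_cases h : d = c
    · simp [List.foldl_cons, h, IH]
    · simp [List.foldl_cons, h, IH]

lemma getDependsA_succ (data : List (String × List String)) (f : Nat) (c : String) :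
    getDependsA data (f+1) c =
      (PySem.Dict.mk data).getD c [] ++
        (((PySem.Dict.mk data).getD c []).filter (fun d => d ≠ c)).flatMap
          (fun d => getDependsA data f d) := by
  rw [show getDependsA data (f+1) c =
    (PySem.Dict.mk data).getD c [] ++
      ((PySem.Dict.mk data).getD c []).foldl
        (fun sub d => if d = c then sub else sub ++ getDependsA data f d) [] from rfl]
  rw [pvFoldA c (fun d => getDependsA data f d) _ []]
  simp

-- fuel independence: on acyclic data, any fuel covering the remaining depth gives A's value
lemma pvFI (data : List (String × List String)) (comp : String)
    (hpre : Pre_get_depends comp data) :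
    ∀ (k : Nat), ∀ (seen : List String) (c : String) (f1 f2 : Nat),
      seen.length + k = data.length + 1 →
      seen.Nodup → (∀ s ∈ seen, s ∈ data.map Prod.fst) →
      pvChainFrom data comp seen c →
      k ≤ f1 → k ≤ f2 →
      getDependsA data f1 c = getDependsA data f2 c := by
  intro k
  induction k with
  | zero =>
    intro seen c f1 f2 hlen hnd hk _ _ _
    have := pvSeen_le data seen hnd hk
    omega
  | succ k IH =>
    intro seen c f1 f2 hlen hnd hk hch hf1 hf2
    match f1, hf1 with
    | f1+1, _ =>
    match f2, hf2 with
    | f2+1, _ =>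
    rw [getDependsA_succ, getDependsA_succ]
    congr 1
    apply List.flatMap_congr
    intro d hd
    rw [List.mem_filter] at hd
    obtain ⟨hdmem, hdne⟩ := hd
    have hdne' : d ≠ c := by simpa using hdne
    have hkey : c ∈ data.map Prod.fst := by
      apply pvKey_of_deps_ne
      intro hnil
      rw [hnil] at hdmem
      exact absurd hdmem (List.not_mem_nil)
    have hnexts : d ∈ pvNexts data c := by
      unfold pvNexts
      rw [List.mem_filter]
      exact ⟨hdmem, by simpa using hdne'⟩
    have hnm : c ∉ seen := pvNotMem data comp hpre seen c hnd hk hch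
    exact IH (c :: seen) d f1 f2 (by simp at hlen ⊢; omega)
      (List.nodup_cons.mpr ⟨hnm, hnd⟩)
      (by intro s hs; rcases List.mem_cons.mp hs with h | h
          · exact h ▸ hkey
          · exact hk s h)
      ⟨hnexts, hch⟩ (by omega) (by omega)

lemma solveB_hit (data : List (String × List String)) (f : Nat) (c : String)
    (cache : PySem.Dict String (List String)) (v : List String)
    (h : cache.get? c = some v) : solveB data (f+1) c cache = (v, cache) := by
  simp only [solveB, h]

lemma solveB_miss (data : List (String × List String)) (f : Nat) (c : String)
    (cache : PySem.Dict String (List String))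
    (h : cache.get? c = none) :
    solveB data (f+1) c cache =
      (let oc := ((PySem.Dict.mk data).getD c []).foldl
        (fun (p : List String × PySem.Dict String (List String)) d =>
          if d ≠ c then
            let r := solveB data f d p.2
            (p.1 ++ r.1, r.2)
          else p) ((PySem.Dict.mk data).getD c [], cache)
       (oc.1, oc.2.insert c oc.1)) := by
  simp only [solveB, h]

-- every value the cache holds is A's value for its key
def pvCacheOK (data : List (String × List String))
    (cache : PySem.Dict String (List String)) : Prop :=
  ∀ (k : String) (v : List String), cache.get? k = some v →
    v = getDependsA data (data.length + 1) k

lemma pvBmain (data : List (String × List String)) (comp : String)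
    (hpre : Pre_get_depends comp data) :
    ∀ (k : Nat), ∀ (seen : List String) (c : String) (f : Nat)
      (cache : PySem.Dict String (List String)),
      seen.length + k = data.length + 1 →
      seen.Nodup → (∀ s ∈ seen, s ∈ data.map Prod.fst) →
      pvChainFrom data comp seen c →
      k ≤ f → pvCacheOK data cache →
      (solveB data f c cache).1 = getDependsA data (data.length + 1) c ∧
        pvCacheOK data (solveB data f c cache).2 := by
  intro k
  induction k with
  | zero =>
    intro seen c f cache hlen hnd hk _ _ _
    have := pvSeen_le data seen hnd hk
    omega
  | succ k IH =>
    intro seen c f cache hlen hnd hk hch hf hcache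
    match f, hf with
    | f+1, _ =>
    cases hhit : cache.get? c with
    | some v =>
      rw [solveB_hit data f c cache v hhit]
      exact ⟨hcache c v hhit, hcache⟩
    | none =>
      rw [solveB_miss data f c cache hhit]
      simp only []
      have hSL : ∀ (l : List String), (∀ d ∈ l, d ∈ (PySem.Dict.mk data).getD c []) →
          ∀ (acc : List String) (cc : PySem.Dict String (List String)), pvCacheOK data cc →
          (l.foldl (fun (p : List String × PySem.Dict String (List String)) d =>
              if d ≠ c then
                let r := solveB data f d p.2
                (p.1 ++ r.1, r.2)
              else p) (acc, cc)).1
            = acc ++ (l.filter (fun d => d ≠ c)).flatMap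
                (fun d => getDependsA data (data.length + 1) d) ∧
          pvCacheOK data (l.foldl (fun (p : List String × PySem.Dict String (List String)) d =>
              if d ≠ c then
                let r := solveB data f d p.2
                (p.1 ++ r.1, r.2)
              else p) (acc, cc)).2 := by
        intro l
        induction l with
        | nil => intro _ acc cc hcc; simp [hcc]
        | cons d l IHl =>
          intro hl acc cc hcc
          by_cases hdc : d = c
          · subst hdc
            simp only [List.foldl_cons, ne_eq, not_true_eq_false, List.filter_cons,
              decide_not]
            have h1 := IHl (fun x hx => hl x (List.mem_cons_of_mem d hx)) acc cc hcc
            simpa using h1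
          · have hdmem : d ∈ (PySem.Dict.mk data).getD c [] := hl d (List.mem_cons_self ..)
            have hkey : c ∈ data.map Prod.fst := by
              apply pvKey_of_deps_ne
              intro hnil
              rw [hnil] at hdmem
              exact absurd hdmem (List.not_mem_nil)
            have hnexts : d ∈ pvNexts data c := by
              unfold pvNexts
              rw [List.mem_filter]
              exact ⟨hdmem, by simpa using hdc⟩
            have hnm : c ∉ seen := pvNotMem data comp hpre seen c hnd hk hch
            have hrec := IH (c :: seen) d f cc (by simp at hlen ⊢; omega)
              (List.nodup_cons.mpr ⟨hnm, hnd⟩)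
              (by intro s hs; rcases List.mem_cons.mp hs with h | h
                  · exact h ▸ hkey
                  · exact hk s h)
              ⟨hnexts, hch⟩ (by omega) hcc
            have h1 := IHl (fun x hx => hl x (List.mem_cons_of_mem d hx))
              (acc ++ (solveB data f d cc).1) (solveB data f d cc).2 hrec.2
            simp only [List.foldl_cons, ne_eq, hdc, not_false_eq_true, if_pos]
            constructor
            · rw [h1.1, hrec.1, List.filter_cons_of_pos (by simpa using hdc)]
              simp [List.append_assoc]
            · exact h1.2
      have hmain := hSL ((PySem.Dict.mk data).getD c []) (fun d hd => hd)
        ((PySem.Dict.mk data).getD c []) cache hcache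
      have hval : (((PySem.Dict.mk data).getD c []).foldl
          (fun (p : List String × PySem.Dict String (List String)) d =>
            if d ≠ c then
              let r := solveB data f d p.2
              (p.1 ++ r.1, r.2)
            else p) ((PySem.Dict.mk data).getD c [], cache)).1
          = getDependsA data (data.length + 1) c := by
        rw [hmain.1, getDependsA_succ]
        congr 1
        apply List.flatMap_congr
        intro d hd
        rw [List.mem_filter] at hd
        obtain ⟨hdmem, hdne⟩ := hd
        have hdne' : d ≠ c := by simpa using hdne
        have hkey : c ∈ data.map Prod.fst := by
          apply pvKey_of_deps_ne
          intro hnil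
          rw [hnil] at hdmem
          exact absurd hdmem (List.not_mem_nil)
        have hnexts : d ∈ pvNexts data c := by
          unfold pvNexts
          rw [List.mem_filter]
          exact ⟨hdmem, by simpa using hdne'⟩
        have hnm : c ∉ seen := pvNotMem data comp hpre seen c hnd hk hch
        exact pvFI data comp hpre k (c :: seen) d (data.length + 1) data.length
          (by simp at hlen ⊢; omega)
          (List.nodup_cons.mpr ⟨hnm, hnd⟩)
          (by intro s hs; rcases List.mem_cons.mp hs with h | h
              · exact h ▸ hkey
              · exact hk s h)
          ⟨hnexts, hch⟩ (by omega) (by omega)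
      refine ⟨hval, ?_⟩
      intro k' v' h'
      rw [PySem.Dict.get?_insert] at h'
      by_cases hkc : k' = c
      · subst hkc
        rw [if_pos rfl] at h'
        injection h' with h''
        rw [← h'']
        exact hval
      · rw [if_neg hkc] at h'
        exact hmain.2 k' v' h'

-- ===== VERDICT (by name: the statement is the Claim_ definition above) =====
theorem get_depends_spec : Claim_equal_get_depends := by
  intro component data _hdom hpre
  unfold Spec_get_depends get_depends get_depends_alt
  exact ((pvBmain data component hpre (data.length + 1) [] component (data.length + 1)
      PySem.Dict.empty (by simp) (by simp) (by simp) rfl (le_refl _)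
      (fun k v h => by simp [PySem.Dict.get?_empty] at h)).1).symm
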